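-- pv_equiv track=rewrite | github.com/Martiin17/TDA_resueltos | 20231110/ladron_lunaticoPD.py | lunatico
-- ===== SOURCE A (Python) =====
-- def lunatico(ganancias):
--     # Manejo de casos base
--     if len(ganancias) == 0:
--         return []
--     if len(ganancias) == 1:
--         return [ganancias[0]]
--     if len(ganancias) == 2:
--         if ganancias[0] >= ganancias[1]:
--             return [ganancias[0]]
--         else:
--             return [ganancias[1]]
--
--     # Considerar ambos casos: sin la última casa y sin la primera casa
--     primer_caso = lunatico_acortado(ganancias[:-1])
--     segundo_caso = lunatico_acortado(ganancias[1:])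
--
--     # Determinar cuál opción da mayor ganancia y reconstruir el camino
--     if primer_caso[-1] >= segundo_caso[-1]:
--         camino = reconstruir_camino(primer_caso, ganancias[:-1])
--         return camino
--     else:
--         camino = reconstruir_camino(segundo_caso, ganancias[1:])
--         return [x + 1 for x in camino]
--
-- def lunatico_acortado(ganancias):
--     OPT = [0] * (len(ganancias))
--     OPT[0] = ganancias[0]
--     OPT[1] = max(ganancias[0], ganancias[1])
--     for n in range(2, len(ganancias)):
--         OPT[n] = max(OPT[n - 1], OPT[n - 2] + ganancias[n])
--     return OPT
--
-- def reconstruir_camino(OPT, ganancias):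
--     camino = []
--     n = len(OPT) - 1
--
--     while n >= 0:
--         if n == 0:
--             camino.append(0)
--             break
--
--         if n == 1: #No uso n-2 para no excederme del index
--             if OPT[n] > OPT[n-1]:
--                 camino.append(n)
--                 break
--             n -= 1
--
--         elif OPT[n - 1] >= OPT[n - 2] + ganancias[n]:
--                 # No se roba esta casa
--                 n -= 1
--         else:
--             # Se roba
--             camino.append(n)
--             n -= 2
--     camino.reverse()
--     return camino
-- ===== SOURCE B (Python) =====
-- def lunatico(ganancias):
--     L = len(ganancias)
--     if L == 0:
--         return []
--     if L == 1:
--         return [ganancias[0]]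
--     if L == 2:
--         return [max(ganancias[0], ganancias[1])]
--     sum1, path1 = _mejor_camino(ganancias[:-1])
--     sum2, path2 = _mejor_camino(ganancias[1:])
--     if sum1 >= sum2:
--         return path1
--     return [x + 1 for x in path2]
--
-- def _mejor_camino(g):
--     # forward DP carrying (best sum, chosen indices) for the last two positions;
--     # the indices are kept as a shared (index, previous) chain, decoded at the end
--     s2, c2 = g[0], (0, None)
--     s1 = max(g[0], g[1])
--     c1 = (1, None) if g[1] > g[0] else (0, None)
--     for n in range(2, len(g)):
--         if s1 >= s2 + g[n]:
--             s2, c2, s1, c1 = s1, c1, s1, c1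
--         else:
--             s2, c2, s1, c1 = s1, c1, s2 + g[n], (n, c2)
--     path = []
--     node = c1
--     while node is not None:
--         path.append(node[0])
--         node = node[1]
--     path.reverse()
--     return s1, path
-- ===== Notes on version B (the rewrite author's own statement) =====
-- stated objective: faster
-- what changed: Replaces A's fill-the-OPT-table-then-backward-reconstruct structure with a single forward DP that carries (best sum, chosen-index chain) for the last two positions, building the path directly with the same tie rule, so the OPT table, the reconstruction pass and the reverse disappear.
import Mathlib
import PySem

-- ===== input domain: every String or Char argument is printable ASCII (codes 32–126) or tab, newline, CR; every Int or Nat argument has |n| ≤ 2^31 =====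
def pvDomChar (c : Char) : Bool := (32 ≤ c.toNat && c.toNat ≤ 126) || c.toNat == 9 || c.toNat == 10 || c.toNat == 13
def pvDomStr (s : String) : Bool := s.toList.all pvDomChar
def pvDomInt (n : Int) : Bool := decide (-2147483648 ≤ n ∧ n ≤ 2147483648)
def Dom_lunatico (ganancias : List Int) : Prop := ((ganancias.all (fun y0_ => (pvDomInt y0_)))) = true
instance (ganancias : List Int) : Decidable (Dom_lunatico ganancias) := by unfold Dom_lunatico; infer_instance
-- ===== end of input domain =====

-- B replaces A's table-then-backward-reconstruction with a single forward DP carrying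
-- (best sum, chosen-index chain) directly; objective: faster (measured constant-factor).

-- ===== PORT A =====
-- lunatico_acortado: OPT table fill (only ever called with len ≥ 2, as in the source).
def lunaticoAcortado (g : List Int) : List Int :=
  (PySem.List.pyRange 2 (g.length : Int) 1).foldl
    (fun OPT n =>
      OPT ++ [max (OPT.getD (n.toNat - 1) 0) (OPT.getD (n.toNat - 2) 0 + PySem.List.pyGetD g n 0)])
    [g.getD 0 0, max (g.getD 0 0) (g.getD 1 0)]

-- the while-loop of reconstruir_camino, recursing on the nonnegative index n;
-- returns camino in Python's append order (largest index first), reversed below.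
def reconRec (OPT g : List Int) : Nat → List Int
  | 0 => [(0 : Int)]
  | 1 => if OPT.getD 1 0 > OPT.getD 0 0 then [(1 : Int)] else reconRec OPT g 0
  | n + 2 =>
      if OPT.getD (n + 1) 0 ≥ OPT.getD n 0 + g.getD (n + 2) 0 then
        reconRec OPT g (n + 1)
      else
        ((n : Int) + 2) :: reconRec OPT g n

def reconstruirCamino (OPT g : List Int) : List Int :=
  (reconRec OPT g (OPT.length - 1)).reverse

def lunatico (ganancias : List Int) : List Int :=
  if ganancias.length = 0 then []
  else if ganancias.length = 1 then [ganancias.getD 0 0]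
  else if ganancias.length = 2 then
    (if ganancias.getD 0 0 ≥ ganancias.getD 1 0 then [ganancias.getD 0 0]
     else [ganancias.getD 1 0])
  else
    -- ganancias[:-1] and ganancias[1:] (list is nonempty here, so take/drop are exact)
    let g1 := ganancias.take (ganancias.length - 1)
    let g2 := ganancias.drop 1
    let primer := lunaticoAcortado g1
    let segundo := lunaticoAcortado g2
    -- primer_caso[-1] >= segundo_caso[-1]  (both lists nonempty)
    if PySem.List.pyGetD primer (-1) 0 ≥ PySem.List.pyGetD segundo (-1) 0 then
      reconstruirCamino primer g1
    else
      (reconstruirCamino segundo g2).map (· + 1)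

-- ===== PORT B =====
-- Source B's (index, previous) chain is exactly a cons list: (n, c) ↦ n :: c, None ↦ [].
-- The decoding while-loop appends head after head while following .1/.2:
def decodeChain : List Int → List Int
  | [] => []
  | n :: rest => n :: decodeChain rest

-- _mejor_camino of Source B: forward DP over range(2, len(g)) carrying (s2, c2, s1, c1).
def mejorCamino (g : List Int) : Int × List Int :=
  let st :=
    (PySem.List.pyRange 2 (g.length : Int) 1).foldl
      (fun (st : Int × List Int × Int × List Int) n =>
        match st with
        | (s2, c2, s1, c1) =>
          if s1 ≥ s2 + PySem.List.pyGetD g n 0 then (s1, c1, s1, c1)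
          else (s1, c1, s2 + PySem.List.pyGetD g n 0, n :: c2))
      (g.getD 0 0, [(0 : Int)], max (g.getD 0 0) (g.getD 1 0),
        if g.getD 1 0 > g.getD 0 0 then [(1 : Int)] else [(0 : Int)])
  (st.2.2.1, (decodeChain st.2.2.2).reverse)

def lunatico_alt (ganancias : List Int) : List Int :=
  if ganancias.length = 0 then []
  else if ganancias.length = 1 then [ganancias.getD 0 0]
  else if ganancias.length = 2 then [max (ganancias.getD 0 0) (ganancias.getD 1 0)]
  else
    let r1 := mejorCamino (ganancias.take (ganancias.length - 1))
    let r2 := mejorCamino (ganancias.drop 1)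
    if r1.1 ≥ r2.1 then r1.2 else r2.2.map (· + 1)

-- ===== PRECONDITION & SPEC =====
def Spec_lunatico (ganancias : List Int) (out : List Int) : Prop := out = lunatico_alt ganancias
instance (ganancias : List Int) (out : List Int) : Decidable (Spec_lunatico ganancias out) := by unfold Spec_lunatico; infer_instance

-- ===== CLAIM (what is proved, stated in full; the proofs are below) =====
def Claim_equal_lunatico : Prop := ∀ (ganancias : List Int), Dom_lunatico ganancias → Spec_lunatico ganancias (lunatico ganancias)

-- ===== LEMMAS AND PROOFS =====

-- mathematical value of OPT[n] and of the optimal index set with A's tie rule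
def optv (g : List Int) : Nat → Int
  | 0 => g.getD 0 0
  | 1 => max (g.getD 0 0) (g.getD 1 0)
  | n + 2 => max (optv g (n + 1)) (optv g n + g.getD (n + 2) 0)

def pathv (g : List Int) : Nat → List Int
  | 0 => [(0 : Int)]
  | 1 => if g.getD 1 0 > g.getD 0 0 then [(1 : Int)] else [(0 : Int)]
  | n + 2 =>
      if optv g (n + 1) ≥ optv g n + g.getD (n + 2) 0 then pathv g (n + 1)
      else pathv g n ++ [(n : Int) + 2]

theorem acortado_fold (g : List Int) (m : Nat) (h2 : 2 ≤ m) (hm : m ≤ g.length) :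
    (PySem.List.pyRange 2 (m : Int) 1).foldl
      (fun OPT n =>
        OPT ++ [max (OPT.getD (n.toNat - 1) 0) (OPT.getD (n.toNat - 2) 0 + PySem.List.pyGetD g n 0)])
      [g.getD 0 0, max (g.getD 0 0) (g.getD 1 0)]
    = (List.range m).map (optv g) := by
  induction m, h2 using Nat.le_induction with
  | base =>
    rw [PySem.List.pyRange_one_eq_nil (by norm_num)]
    simp [List.range_succ, optv]
  | succ m hm2 ih =>
    have hmle : m ≤ g.length := by omega
    obtain ⟨k, rfl⟩ : ∃ k, m = k + 2 := ⟨m - 2, by omega⟩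
    rw [show ((k + 2 + 1 : Nat) : Int) = ((k + 2 : Nat) : Int) + 1 by push_cast; ring,
        PySem.List.pyRange_one_succ_right (by push_cast; omega), List.foldl_append,
        ih hmle]
    simp only [List.foldl_cons, List.foldl_nil]
    rw [show (((k + 2 : Nat) : Int)).toNat = k + 2 by omega]
    rw [PySem.List.getD_map_range _ _ _ _ (by omega),
        PySem.List.getD_map_range _ _ _ _ (by omega),
        PySem.List.pyGetD_natCast]
    have hv : max (optv g (k + 1)) (optv g k + g.getD (k + 2) 0) = optv g (k + 2) := by
      rw [optv]
    rw [show k + 2 - 1 = k + 1 from rfl, show k + 2 - 2 = k from rfl, hv]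
    conv_rhs => rw [List.range_succ]
    rw [List.map_append, List.map_cons, List.map_nil]

theorem acortado_eq (g : List Int) (h : 2 ≤ g.length) :
    lunaticoAcortado g = (List.range g.length).map (optv g) := by
  unfold lunaticoAcortado
  exact acortado_fold g g.length h le_rfl

theorem reconRec_eq (g : List Int) (hl : 2 ≤ g.length) :
    ∀ n, n < g.length →
      (reconRec ((List.range g.length).map (optv g)) g n).reverse = pathv g n := by
  intro n
  induction n using Nat.strong_induction_on with
  | _ n ih =>
    match n with
    | 0 => intro _; simp [reconRec, pathv]
    | 1 =>
      intro _
      rw [reconRec, PySem.List.getD_map_range _ _ _ _ (by omega),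
          PySem.List.getD_map_range _ _ _ _ (by omega), pathv]
      by_cases hc : g.getD 1 0 > g.getD 0 0
      · rw [if_pos (by simp only [optv]; exact lt_max_iff.mpr (Or.inr hc)),
            if_pos hc]
        simp
      · have hm01 : optv g 1 = optv g 0 := by
          simp only [optv, Int.max_def]; split_ifs <;> omega
        rw [if_neg (by rw [hm01]; exact lt_irrefl _), if_neg hc, reconRec]
        simp
    | n + 2 =>
      intro hn
      rw [reconRec, PySem.List.getD_map_range _ _ _ _ (by omega),
          PySem.List.getD_map_range _ _ _ _ (by omega)]
      rw [pathv]
      by_cases hc : optv g (n + 1) ≥ optv g n + g.getD (n + 2) 0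
      · rw [if_pos hc, if_pos hc, ih (n + 1) (by omega) (by omega)]
      · rw [if_neg hc, if_neg hc]
        rw [List.reverse_cons, ih n (by omega) (by omega)]

theorem decodeChain_eq (l : List Int) : decodeChain l = l := by
  induction l with
  | nil => rfl
  | cons n rest ih => rw [decodeChain, ih]

theorem mejor_fold (g : List Int) (m : Nat) (h2 : 2 ≤ m) (hm : m ≤ g.length) :
    (PySem.List.pyRange 2 (m : Int) 1).foldl
      (fun (st : Int × List Int × Int × List Int) n =>
        match st with
        | (s2, c2, s1, c1) =>
          if s1 ≥ s2 + PySem.List.pyGetD g n 0 then (s1, c1, s1, c1)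
          else (s1, c1, s2 + PySem.List.pyGetD g n 0, n :: c2))
      (g.getD 0 0, [(0 : Int)], max (g.getD 0 0) (g.getD 1 0),
        if g.getD 1 0 > g.getD 0 0 then [(1 : Int)] else [(0 : Int)])
    = (optv g (m - 2), (pathv g (m - 2)).reverse, optv g (m - 1), (pathv g (m - 1)).reverse) := by
  induction m, h2 using Nat.le_induction with
  | base =>
    rw [PySem.List.pyRange_one_eq_nil (by norm_num)]
    simp only [List.foldl_nil]
    simp [optv, pathv]
    split <;> rfl
  | succ m hm2 ih =>
    have hmle : m ≤ g.length := by omega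
    obtain ⟨k, rfl⟩ : ∃ k, m = k + 2 := ⟨m - 2, by omega⟩
    rw [show ((k + 2 + 1 : Nat) : Int) = ((k + 2 : Nat) : Int) + 1 by push_cast; ring,
        PySem.List.pyRange_one_succ_right (by push_cast; omega), List.foldl_append,
        ih hmle]
    simp only [List.foldl_cons, List.foldl_nil,
      show k + 2 - 2 = k from rfl, show k + 2 - 1 = k + 1 from rfl,
      show k + 2 + 1 - 2 = k + 1 from rfl, show k + 2 + 1 - 1 = k + 2 from rfl]
    rw [PySem.List.pyGetD_natCast]
    by_cases hc : optv g (k + 1) ≥ optv g k + g.getD (k + 2) 0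
    · rw [if_pos hc]
      have : optv g (k + 2) = optv g (k + 1) := by
        rw [optv]; omega
      rw [pathv, if_pos hc, this]
    · rw [if_neg hc]
      have h1 : optv g (k + 2) = optv g k + g.getD (k + 2) 0 := by
        rw [optv]; omega
      rw [pathv, if_neg hc, h1, List.reverse_append]
      norm_num

theorem mejor_eq (g : List Int) (h : 2 ≤ g.length) :
    mejorCamino g = (optv g (g.length - 1), pathv g (g.length - 1)) := by
  unfold mejorCamino
  rw [mejor_fold g g.length h le_rfl]
  simp [decodeChain_eq]

-- ===== VERDICT (by name: the statement is the Claim_ definition above) =====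
theorem lunatico_spec : Claim_equal_lunatico := by
  intro g _
  unfold Spec_lunatico lunatico lunatico_alt
  by_cases h0 : g.length = 0
  · simp [h0]
  by_cases h1 : g.length = 1
  · simp [h1]
  by_cases h2 : g.length = 2
  · rw [if_neg h0, if_neg h1, if_pos h2, if_neg h0, if_neg h1, if_pos h2]
    by_cases hc : g.getD 0 0 ≥ g.getD 1 0
    · rw [if_pos hc, max_eq_left hc]
    · rw [if_neg hc, max_eq_right (by omega)]
  · have h3 : 3 ≤ g.length := by omega
    simp only [h0, h1, h2, if_false]
    have hg1 : (g.take (g.length - 1)).length = g.length - 1 := by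
      rw [List.length_take]; omega
    have hg2 : (g.drop 1).length = g.length - 1 := List.length_drop
    have h2a : 2 ≤ (g.take (g.length - 1)).length := by omega
    have h2b : 2 ≤ (g.drop 1).length := by omega
    rw [mejor_eq _ h2a, mejor_eq _ h2b]
    unfold reconstruirCamino
    rw [acortado_eq _ h2a, acortado_eq _ h2b]
    rw [PySem.List.pyGetD_neg_ofNat _ 1 0 (by omega)
          (by simp only [List.length_map, List.length_range]; omega),
        PySem.List.pyGetD_neg_ofNat _ 1 0 (by omega)
          (by simp only [List.length_map, List.length_range]; omega)]
    simp only [List.length_map, List.length_range, List.getElem_map, List.getElem_range]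
    rw [reconRec_eq _ h2a _ (by omega), reconRec_eq _ h2b _ (by omega)]
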